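-- pv_equiv track=rewrite | github.com/thantrieu/Python2030 | net/braniumacademy/ex_chapter3/lesson31/Exercises4.py | is_reversible
-- ===== SOURCE A (Python) =====
-- def is_reversible(n):
--     """This function check whether or not n is reversible number"""
--     if n < 0:
--         n *= -1
--     f = n
--     r = 0
--     while n > 0:
--         r = r * 10 + n % 10
--         n //= 10
--     return f == r
-- ===== SOURCE B (Python) =====
-- def is_reversible(n):
--     """This function check whether or not n is reversible number"""
--     s = str(abs(n))
--     return s == s[::-1]
-- ===== Notes on version B (the rewrite author's own statement) =====
-- stated objective: idiomatic
-- what changed: Replaces the modulo/floor-division loop that rebuilds the reversed integer with a palindrome test on the decimal string of abs(n) via slicing.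
import Mathlib
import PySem

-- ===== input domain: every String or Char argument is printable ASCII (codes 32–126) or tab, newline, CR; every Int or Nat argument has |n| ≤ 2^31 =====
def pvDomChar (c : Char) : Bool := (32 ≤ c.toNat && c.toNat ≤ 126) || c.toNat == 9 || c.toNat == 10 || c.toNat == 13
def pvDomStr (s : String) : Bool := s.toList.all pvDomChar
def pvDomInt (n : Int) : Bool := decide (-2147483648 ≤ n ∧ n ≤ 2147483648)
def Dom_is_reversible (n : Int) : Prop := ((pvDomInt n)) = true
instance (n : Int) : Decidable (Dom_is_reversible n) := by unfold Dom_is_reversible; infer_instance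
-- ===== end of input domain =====

-- B replaces A's modulo/floor-division digit-reversal loop with a palindrome test on the
-- decimal string of abs(n) (idiomatic; same asymptotic cost).

-- ===== PORT A =====
-- the 'while n > 0: r = r*10 + n%10; n //= 10' loop, on state (n, r)
def pvRevLoop (n r : Int) : Int :=
  if h : n > 0 then pvRevLoop (PySem.Int.floordiv n 10) (r * 10 + PySem.Int.mod n 10) else r
termination_by n.toNat
decreasing_by
  rw [PySem.Int.floordiv_eq_ediv_of_pos (by norm_num)]; omega

def is_reversible (n : Int) : Bool :=
  let n1 : Int := if n < 0 then n * (-1) else n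
  let f := n1
  decide (f = pvRevLoop n1 0)

-- ===== PORT B =====
def is_reversible_alt (n : Int) : Bool :=
  let s := PySem.Int.toStr |n|
  decide (some s = PySem.Str.slice? s none none (-1))

-- ===== PRECONDITION & SPEC =====
def Spec_is_reversible (n : Int) (out : Bool) : Prop := out = is_reversible_alt n
instance (n : Int) (out : Bool) : Decidable (Spec_is_reversible n out) := by unfold Spec_is_reversible; infer_instance

-- ===== CLAIM (what is proved, stated in full; the proofs are below) =====
def Claim_equal_is_reversible : Prop := ∀ (n : Int), Dom_is_reversible n → Spec_is_reversible n (is_reversible n)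

-- ===== LEMMAS AND PROOFS =====

-- A's loop computes r · 10^(#digits m) + the value of m's digit list read backwards.
theorem pvRevLoop_natCast (m : Nat) : ∀ (r : Nat),
    pvRevLoop (m : Int) (r : Int) =
      ((r * 10 ^ (Nat.digits 10 m).length + Nat.ofDigits 10 (Nat.digits 10 m).reverse : Nat) : Int) := by
  induction m using Nat.strong_induction_on with
  | _ m ih =>
    intro r
    rw [pvRevLoop]
    by_cases hm : 0 < m
    · have hcond : ((m : Int) > 0) := by exact_mod_cast hm
      rw [dif_pos hcond]
      have h1 : PySem.Int.floordiv (m : Int) 10 = ((m / 10 : Nat) : Int) := by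
        exact_mod_cast PySem.Int.floordiv_natCast m 10
      have h2 : PySem.Int.mod (m : Int) 10 = ((m % 10 : Nat) : Int) := by
        exact_mod_cast PySem.Int.mod_natCast m 10
      have h3 : ((r : Int) * 10 + ((m % 10 : Nat) : Int)) = ((r * 10 + m % 10 : Nat) : Int) := by
        push_cast; ring
      rw [h1, h2, h3, ih (m / 10) (Nat.div_lt_self hm (by norm_num)) (r * 10 + m % 10)]
      have hdig : Nat.digits 10 m = m % 10 :: Nat.digits 10 (m / 10) :=
        Nat.digits_def' (by norm_num) hm
      rw [hdig]
      push_cast [List.reverse_cons, Nat.ofDigits_append, Nat.ofDigits_cons, Nat.ofDigits_nil,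
        List.length_reverse, List.length_cons, pow_succ]
      ring
    · have hm0 : m = 0 := by omega
      subst hm0
      norm_num
  
-- Nat.toDigitsCore, given enough fuel and a positive number, is the reversed mapped digit list.
theorem toDigitsCore_eq (f : Nat) : ∀ (m : Nat) (acc : List Char), 0 < m → m ≤ f →
    Nat.toDigitsCore 10 f m acc = ((Nat.digits 10 m).map Nat.digitChar).reverse ++ acc := by
  induction f with
  | zero => intro m acc h0 hf; omega
  | succ f ih =>
    intro m acc h0 hf
    have hdig : Nat.digits 10 m = m % 10 :: Nat.digits 10 (m / 10) :=
      Nat.digits_def' (by norm_num) h0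
    simp only [Nat.toDigitsCore]
    by_cases h : m / 10 = 0
    · rw [if_pos h]
      have : Nat.digits 10 (m / 10) = [] := by rw [h]; simp
      rw [hdig, this]
      simp
    · rw [if_neg h]
      rw [ih (m / 10) _ (by omega) (by omega)]
      rw [hdig]
      simp

theorem toDigits_eq_of_pos (m : Nat) (h0 : 0 < m) :
    Nat.toDigits 10 m = ((Nat.digits 10 m).map Nat.digitChar).reverse := by
  have := toDigitsCore_eq (m + 1) m [] h0 (by omega)
  simpa [Nat.toDigits] using this

-- base-10 evaluation is injective on equal-length lists of digits < 10
theorem ofDigits_inj10 : ∀ (L1 L2 : List Nat), L1.length = L2.length →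
    (∀ x ∈ L1, x < 10) → (∀ x ∈ L2, x < 10) →
    Nat.ofDigits 10 L1 = Nat.ofDigits 10 L2 → L1 = L2 := by
  intro L1
  induction L1 with
  | nil => intro L2 hlen _ _ _; cases L2 <;> simp_all
  | cons d1 t1 ih =>
    intro L2 hlen hb1 hb2 hv
    cases L2 with
    | nil => simp_all
    | cons d2 t2 =>
      rw [Nat.ofDigits_cons, Nat.ofDigits_cons] at hv
      have hd1 : d1 < 10 := hb1 d1 (by simp)
      have hd2 : d2 < 10 := hb2 d2 (by simp)
      have hd : d1 = d2 ∧ Nat.ofDigits 10 t1 = Nat.ofDigits 10 t2 := by omega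
      have ht : t1 = t2 := ih t2 (by simpa using hlen)
        (fun x hx => hb1 x (List.mem_cons_of_mem _ hx))
        (fun x hx => hb2 x (List.mem_cons_of_mem _ hx)) hd.2
      rw [hd.1, ht]

theorem digitChar_inj10 : ∀ d1, d1 < 10 → ∀ d2, d2 < 10 →
    Nat.digitChar d1 = Nat.digitChar d2 → d1 = d2 := by decide

theorem map_digitChar_inj : ∀ (L1 L2 : List Nat),
    (∀ x ∈ L1, x < 10) → (∀ x ∈ L2, x < 10) →
    L1.map Nat.digitChar = L2.map Nat.digitChar → L1 = L2 := by
  intro L1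
  induction L1 with
  | nil => intro L2 _ _ h; cases L2 <;> simp_all
  | cons d1 t1 ih =>
    intro L2 hb1 hb2 h
    cases L2 with
    | nil => simp_all
    | cons d2 t2 =>
      simp only [List.map_cons, List.cons.injEq] at h
      have := digitChar_inj10 d1 (hb1 d1 (by simp)) d2 (hb2 d2 (by simp)) h.1
      rw [this, ih t2 (fun x hx => hb1 x (List.mem_cons_of_mem _ hx))
        (fun x hx => hb2 x (List.mem_cons_of_mem _ hx)) h.2]

-- the central fact: arithmetic digit-reversal fixed point ↔ decimal string palindrome
theorem key_iff (m : Nat) :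
    (m = Nat.ofDigits 10 (Nat.digits 10 m).reverse) ↔
    (Nat.toDigits 10 m = (Nat.toDigits 10 m).reverse) := by
  by_cases h0 : 0 < m
  · set L := Nat.digits 10 m with hL
    have hbL : ∀ x ∈ L, x < 10 := fun x hx => Nat.digits_lt_base (by norm_num) hx
    have hbLr : ∀ x ∈ L.reverse, x < 10 := fun x hx => hbL x (List.mem_reverse.mp hx)
    constructor
    · intro h
      have hm : Nat.ofDigits 10 L = Nat.ofDigits 10 L.reverse := by
        rw [hL, Nat.ofDigits_digits]; exact h
      have hLL : L = L.reverse :=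
        ofDigits_inj10 L L.reverse (by simp) hbL hbLr hm
      rw [toDigits_eq_of_pos m h0, ← hL, List.reverse_reverse, ← List.map_reverse, ← hLL]
    · intro h
      rw [toDigits_eq_of_pos m h0, ← hL, List.reverse_reverse] at h
      rw [← List.map_reverse] at h
      have hLL : L.reverse = L := map_digitChar_inj L.reverse L hbLr hbL h
      conv_lhs => rw [← Nat.ofDigits_digits 10 m, ← hL, ← hLL]
  · have hm0 : m = 0 := by omega
    subst hm0
    constructor <;> intro _ <;> decide

-- A computes the fixed-point condition on |n|'s digits
theorem is_reversible_eq (n : Int) :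
    is_reversible n =
      decide (n.natAbs = Nat.ofDigits 10 (Nat.digits 10 n.natAbs).reverse) := by
  have h1 : (if n < 0 then n * (-1) else n) = ((n.natAbs : Nat) : Int) := by
    split_ifs with h <;> omega
  have h0 : ((0 : Nat) : Int) = (0 : Int) := rfl
  simp only [is_reversible, h1]
  rw [← h0, pvRevLoop_natCast n.natAbs 0]
  rw [decide_eq_decide]
  omega

-- B computes the string-palindrome condition on str(|n|)
theorem is_reversible_alt_eq (n : Int) :
    is_reversible_alt n =
      decide (Nat.toDigits 10 n.natAbs = (Nat.toDigits 10 n.natAbs).reverse) := by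
  have habs : |n| = ((n.natAbs : Nat) : Int) := Int.abs_eq_natAbs n
  have hchars : PySem.Int.toChars |n| = Nat.toDigits 10 n.natAbs := by
    rw [PySem.Int.toChars, habs, if_neg (by omega : ¬ ((n.natAbs : Nat) : Int) < 0)]
    congr 1
  simp only [is_reversible_alt, PySem.Str.slice?_none_none_neg_one, Option.some.injEq]
  rw [decide_eq_decide, ← String.toList_inj]
  simp [PySem.Int.toList_toStr, hchars]

-- ===== VERDICT (by name: the statement is the Claim_ definition above) =====
theorem is_reversible_spec : Claim_equal_is_reversible := by
  intro n _
  unfold Spec_is_reversible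
  rw [is_reversible_eq, is_reversible_alt_eq, decide_eq_decide]
  exact key_iff n.natAbs
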